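-- pv_equiv track=rewrite | github.com/adarshsankarrs/FiniteStateAutomata-NLP | 3_StopWordRemoval.py | splitsen
-- ===== SOURCE A (Python) =====
-- def splitsen(my_str):
--     punctuations = '''!()-[]{};:'"\,<>./?@#$%^&*_~'''
--     no_punct = ""
--     for char in my_str:
--         if char not in punctuations:
--             no_punct = no_punct + char
--
--     # display the unpunctuated string
--     l = no_punct.split()
--     return l
-- ===== SOURCE B (Python) =====
-- def splitsen(my_str):
--     punctuations = '''!()-[]{};:'"\,<>./?@#$%^&*_~'''
--     result = []
--     for tok in my_str.split():
--         cleaned = ''.join(ch for ch in tok if ch not in punctuations)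
--         if cleaned:
--             result.append(cleaned)
--     return result
-- ===== Notes on version B (the rewrite author's own statement) =====
-- stated objective: alternative
-- what changed: B splits the string into whitespace tokens first and then strips punctuation per token, dropping tokens that become empty, instead of A's build-a-whole-filtered-string-then-split; proven equal because the removed chars are never whitespace.
import Mathlib
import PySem

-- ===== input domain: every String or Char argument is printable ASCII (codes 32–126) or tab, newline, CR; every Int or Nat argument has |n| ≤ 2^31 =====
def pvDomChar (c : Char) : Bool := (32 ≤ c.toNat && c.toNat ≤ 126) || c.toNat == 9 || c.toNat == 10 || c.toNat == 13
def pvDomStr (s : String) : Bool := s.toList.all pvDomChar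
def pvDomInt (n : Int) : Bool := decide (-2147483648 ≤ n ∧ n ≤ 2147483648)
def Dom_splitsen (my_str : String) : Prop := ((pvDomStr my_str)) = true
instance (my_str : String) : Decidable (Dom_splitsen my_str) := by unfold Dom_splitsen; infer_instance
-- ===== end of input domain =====

-- B splits into whitespace tokens first, then strips punctuation per token and drops tokens that
-- become empty, instead of A's filter-the-whole-string-then-split; same cost, different decomposition.

-- the punctuation literal of the Python source (the '\,' keeps the backslash)
def pvPunct : List Char := "!()-[]{};:'\"\\,<>./?@#$%^&*_~".toList

-- ===== PORT A =====
-- the string accumulator 'no_punct' is kept as a List Char (exact: Python str concat = list append);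
-- 'char not in punctuations' is the 1-char substring test, PySem.Chars.isIn [c] pvPunct
def splitsen (my_str : String) : List String :=
  let no_punct : List Char :=
    my_str.toList.foldl
      (fun np c => if PySem.Chars.isIn [c] pvPunct = false then np ++ [c] else np) []
  (PySem.Chars.split₀ no_punct).map String.mk

-- ===== PORT B =====
def splitsen_alt (my_str : String) : List String :=
  (PySem.Str.split₀ my_str).foldl
    (fun res tok =>
      if !(tok.toList.filter (fun c => !pvPunct.contains c)).isEmpty then
        res ++ [String.mk (tok.toList.filter (fun c => !pvPunct.contains c))]
      else res) []

-- ===== PRECONDITION & SPEC =====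
def Spec_splitsen (my_str : String) (out : List String) : Prop := out = splitsen_alt my_str
instance (my_str : String) (out : List String) : Decidable (Spec_splitsen my_str out) := by unfold Spec_splitsen; infer_instance

-- ===== CLAIM (what is proved, stated in full; the proofs are below) =====
def Claim_equal_splitsen : Prop := ∀ (my_str : String), Dom_splitsen my_str → Spec_splitsen my_str (splitsen my_str)

-- ===== LEMMAS AND PROOFS =====

def pvKeep (c : Char) : Bool := !pvPunct.contains c

lemma pvIsIn_singleton (c : Char) (l : List Char) :
    PySem.Chars.isIn [c] l = l.contains c := by
  by_cases h : c ∈ l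
  · obtain ⟨s, t, rfl⟩ := List.append_of_mem h
    have : PySem.Chars.isIn [c] (s ++ c :: t) = true :=
      (PySem.Chars.isIn_iff_infix _ _).mpr ⟨s, t, by simp⟩
    simp [this, h]
  · have : PySem.Chars.isIn [c] l = false := by
      apply (PySem.Chars.isIn_eq_false_iff _ _).mpr
      intro hin
      exact h (hin.sublist.subset (by simp))
    simp [this, h]

lemma pvKeep_of_isspace (c : Char) (h : PySem.Chars.isspace c = true) : pvKeep c = true := by
  unfold pvKeep
  by_contra hb
  have hmem : c ∈ pvPunct := by
    simp only [Bool.not_eq_true] at hb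
    simpa using hb
  have hall : pvPunct.all (fun c => !PySem.Chars.isspace c) = true := by decide
  have := List.all_eq_true.mp hall c hmem
  simp [h] at this

lemma go_acc (s : List Char) : ∀ (cur : List Char) (acc : List (List Char)),
    PySem.Chars.split₀.go s cur acc = acc.reverse ++ PySem.Chars.split₀.go s cur [] := by
  induction s with
  | nil =>
    intro cur acc
    simp only [PySem.Chars.split₀.go]
    split <;> simp
  | cons c rest ih =>
    intro cur acc
    simp only [PySem.Chars.split₀.go]
    split_ifs with h1 h2
    · rw [ih [] acc]
    · rw [ih [] (cur.reverse :: acc), ih [] [cur.reverse]]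
      simp
    · rw [ih (c :: cur) acc]

lemma go_filter (keep : Char → Bool) (hkeep : ∀ c, PySem.Chars.isspace c = true → keep c = true) :
    ∀ (s cur : List Char),
      PySem.Chars.split₀.go (s.filter keep) (cur.filter keep) [] =
        ((PySem.Chars.split₀.go s cur []).map (fun w => w.filter keep)).filter
          (fun w => !w.isEmpty) := by
  intro s
  induction s with
  | nil =>
    intro cur
    simp only [List.filter_nil, PySem.Chars.split₀.go]
    by_cases hc : cur = []
    · simp [hc]
    · have hne : cur.isEmpty = false := by simp [hc]
      simp only [hne, List.reverse_nil, if_false, Bool.false_eq_true]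
      by_cases hf : (cur.filter keep).isEmpty = true
      · simp [List.filter_reverse, List.isEmpty_iff.mp hf]
      · have hf' : (cur.filter keep) ≠ [] := by
          intro h; exact hf (by simp [h])
        simp [List.isEmpty_iff, hf', List.filter_reverse]
  | cons c rest ih =>
    intro cur
    by_cases hsp : PySem.Chars.isspace c = true
    · have hk : keep c = true := hkeep c hsp
      have hfil : (c :: rest).filter keep = c :: rest.filter keep := by simp [hk]
      rw [hfil]
      simp only [PySem.Chars.split₀.go, hsp, if_true]
      rw [go_acc rest ([]) [], go_acc (rest.filter keep)]
      by_cases hc : cur = []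
      · have : (cur.filter keep) = [] := by simp [hc]
        have h3 := ih []
        simp only [List.filter_nil] at h3
        simp only [hc, List.filter_nil, List.isEmpty_nil, if_true]
        exact h3
      · have hne : cur.isEmpty = false := by simp [hc]
        simp only [hne, Bool.false_eq_true, if_false]
        rw [go_acc rest [] [cur.reverse]]
        by_cases hf : (cur.filter keep) = []
        · have h1 : (cur.filter keep).isEmpty = true := by simp [hf]
          have h2 : (cur.reverse.filter keep).isEmpty = true := by
            simp [List.filter_reverse, hf]
          have h3 := ih []
          simp only [List.filter_nil] at h3
          simp only [h1, if_true, List.map_append, List.filter_append]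
          rw [h3]
          simp [List.filter_reverse, List.isEmpty_reverse, h1]
        · have h1 : (cur.filter keep).isEmpty = false := by simp [hf]
          have h2 : (cur.reverse.filter keep).isEmpty = false := by
            simp [List.filter_reverse, hf]
          simp only [h1, Bool.false_eq_true, if_false]
          rw [go_acc (rest.filter keep) [] [(cur.filter keep).reverse]]
          have h3 := ih []
          simp only [List.filter_nil] at h3
          simp only [List.map_append, List.filter_append]
          rw [h3]
          simp [List.filter_reverse, List.isEmpty_reverse, h1]
    · have hsp' : PySem.Chars.isspace c = false := by simpa using hsp
      by_cases hk : keep c = true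
      · have hfil : (c :: rest).filter keep = c :: rest.filter keep := by simp [hk]
        rw [hfil]
        simp only [PySem.Chars.split₀.go, hsp', Bool.false_eq_true, if_false]
        have : c :: cur.filter keep = (c :: cur).filter keep := by simp [hk]
        rw [this]
        exact ih (c :: cur)
      · have hk' : keep c = false := by simpa using hk
        have hfil : (c :: rest).filter keep = rest.filter keep := by simp [hk']
        rw [hfil]
        have hcur : cur.filter keep = (c :: cur).filter keep := by simp [hk']
        conv_lhs => rw [hcur]
        rw [ih (c :: cur)]
        simp only [PySem.Chars.split₀.go, hsp', Bool.false_eq_true, if_false]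

lemma split₀_filter (keep : Char → Bool)
    (hkeep : ∀ c, PySem.Chars.isspace c = true → keep c = true) (s : List Char) :
    PySem.Chars.split₀ (s.filter keep) =
      ((PySem.Chars.split₀ s).map (fun w => w.filter keep)).filter (fun w => !w.isEmpty) := by
  unfold PySem.Chars.split₀
  exact go_filter keep hkeep s []

lemma splitsen_eq (my_str : String) :
    splitsen my_str =
      ((PySem.Chars.split₀ (my_str.toList.filter pvKeep)).map String.mk) := by
  simp only [splitsen]
  congr 1
  congr 1
  have hcongr := PySem.List.foldl_congr_mem my_str.toList
    (fun np c => if PySem.Chars.isIn [c] pvPunct = false then np ++ [c] else np)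
    (fun np c => if pvKeep c = true then np ++ [c] else np) []
    (by intro acc x _
        by_cases h : pvPunct.contains x = true <;>
          simp [pvIsIn_singleton, pvKeep])
  rw [hcongr, PySem.List.foldl_append_ite_eq_filter]
  simp

-- ===== VERDICT (by name: the statement is the Claim_ definition above) =====
theorem splitsen_spec : Claim_equal_splitsen := by
  intro my_str _
  unfold Spec_splitsen
  have hB : splitsen_alt my_str =
      List.map (fun tok => String.mk (tok.toList.filter (fun c => !pvPunct.contains c)))
        (List.filter (fun tok => !(tok.toList.filter (fun c => !pvPunct.contains c)).isEmpty)
          (PySem.Str.split₀ my_str)) := by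
    simp only [splitsen_alt]
    simpa using PySem.List.foldl_append_if
      (fun tok => !(tok.toList.filter (fun c => !pvPunct.contains c)).isEmpty)
      (fun tok => String.mk (tok.toList.filter (fun c => !pvPunct.contains c)))
      (PySem.Str.split₀ my_str) []
  rw [hB, splitsen_eq, split₀_filter pvKeep pvKeep_of_isspace, ← PySem.Str.split₀_map_toList]
  simp only [List.map_map, List.filter_map]
  congr 1
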